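-- pv_equiv track=rewrite | github.com/Christon-Ragavan/CAMAT | music_xml_parser/core/utils.py | _gen_alpha
-- ===== SOURCE A (Python) =====
-- def _gen_alpha(N):
--     letters = []
--     for i in range(N):
--         newCharacter = i % 26
--         i //= 26
--         s = "" + chr(newCharacter + ord('A'))
--         while i != 0:
--             newCharacter = i % 26
--             i //= 26
--             s = chr(newCharacter + ord('A')) + s
--         letters.append(s)
--     return letters
-- ===== SOURCE B (Python) =====
-- def _gen_alpha(N):
--     def conv(i):
--         q, r = divmod(i, 26)
--         return (conv(q) if q else '') + chr(r + ord('A'))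
--     return [conv(i) for i in range(N)]
-- ===== Notes on version B (the rewrite author's own statement) =====
-- stated objective: simpler
-- what changed: Replaced the iterative inner while-loop that builds each label by prepending digits with a recursive divmod helper conv(i)=conv(i//26)+digit(i%26), and the outer loop/append with a list comprehension.
import Mathlib
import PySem

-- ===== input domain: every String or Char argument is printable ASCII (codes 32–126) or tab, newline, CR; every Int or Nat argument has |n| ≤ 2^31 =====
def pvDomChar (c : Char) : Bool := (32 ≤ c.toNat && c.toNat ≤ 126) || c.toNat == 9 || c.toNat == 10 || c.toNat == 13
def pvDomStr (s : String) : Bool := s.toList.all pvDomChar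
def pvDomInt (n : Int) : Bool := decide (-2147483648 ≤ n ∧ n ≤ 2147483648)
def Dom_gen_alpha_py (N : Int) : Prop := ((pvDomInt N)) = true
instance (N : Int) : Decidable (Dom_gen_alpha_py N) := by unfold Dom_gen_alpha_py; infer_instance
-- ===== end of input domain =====

-- B replaces A's iterative digit-prepending inner while-loop with a recursive divmod
-- helper (label i = label (i/26) ++ digit (i%26)); objective: simpler decomposition.


-- ===== PORT A =====
-- A's inner `while i != 0` loop, prepending chr(i % 26 + 65).  The loop variable i comes
-- from range(N) so it is nonnegative; on nonnegative ints Python's // and % coincide with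
-- Nat division/modulo, so the loop state is carried as a Nat (exact on all admitted inputs).
def pvWhileA (i : Nat) (s : List Char) : List Char :=
  if h : i = 0 then s
  else pvWhileA (i / 26) (Char.ofNat (i % 26 + 65) :: s)
termination_by i
decreasing_by exact Nat.div_lt_self (Nat.pos_of_ne_zero h) (by norm_num)

def gen_alpha_py (N : Int) : List String :=
  (PySem.List.pyRange 0 N 1).foldl
    (fun letters i =>
      let i0 := i.toNat
      let newCharacter := i0 % 26
      let i1 := i0 / 26
      let s := [Char.ofNat (newCharacter + 65)]
      letters ++ [String.mk (pvWhileA i1 s)])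
    []

-- ===== PORT B =====
-- B's recursive helper conv: q, r = divmod(i, 26); (conv q if q else '') + chr(r + 65).
-- i comes from range(N), hence nonnegative: divmod = Nat div/mod (exact here).
def pvConvB (i : Nat) : List Char :=
  let q := i / 26
  let r := i % 26
  (if h : q = 0 then [] else pvConvB q) ++ [Char.ofNat (r + 65)]
termination_by i
decreasing_by exact Nat.lt_of_lt_of_le (Nat.div_lt_self (Nat.pos_of_ne_zero (by omega)) (by norm_num)) (Nat.le_refl i)

def gen_alpha_py_alt (N : Int) : List String :=
  (PySem.List.pyRange 0 N 1).map (fun i => String.mk (pvConvB i.toNat))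

-- ===== PRECONDITION & SPEC =====
def Spec_gen_alpha_py (N : Int) (out : List String) : Prop := out = gen_alpha_py_alt N
instance (N : Int) (out : List String) : Decidable (Spec_gen_alpha_py N out) := by unfold Spec_gen_alpha_py; infer_instance

-- ===== CLAIM =====
def Claim_equal_gen_alpha_py : Prop := ∀ (N : Int), Dom_gen_alpha_py N → Spec_gen_alpha_py N (gen_alpha_py N)

-- ===== LEMMAS AND PROOFS =====
-- A's while-loop equals B's recursion applied to the quotient, with the accumulator appended.
theorem pvWhileA_eq_convB (q : Nat) (acc : List Char) :
    pvWhileA q acc = (if q = 0 then [] else pvConvB q) ++ acc := by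
  induction q using Nat.strong_induction_on generalizing acc with
  | _ q ih =>
    rw [pvWhileA]
    by_cases h : q = 0
    · simp [h]
    · rw [dif_neg h, if_neg h]
      rw [ih (q / 26) (Nat.div_lt_self (Nat.pos_of_ne_zero h) (by norm_num))]
      conv_rhs => rw [pvConvB]
      simp

theorem label_eq (i : Nat) :
    pvWhileA (i / 26) [Char.ofNat (i % 26 + 65)] = pvConvB i := by
  rw [pvWhileA_eq_convB]
  conv_rhs => rw [pvConvB]
  simp

theorem foldl_append_map {α β : Type} (f : α → β) :
    ∀ (L : List α) (acc : List β),
      L.foldl (fun a i => a ++ [f i]) acc = acc ++ L.map f := by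
  intro L
  induction L with
  | nil => simp
  | cons x xs ih => intro acc; simp [List.foldl, ih]

-- ===== VERDICT =====
theorem gen_alpha_py_spec : Claim_equal_gen_alpha_py := by
  intro N _
  unfold Spec_gen_alpha_py gen_alpha_py gen_alpha_py_alt
  rw [foldl_append_map]
  simp only [List.nil_append]
  congr 1
  funext i
  rw [label_eq]
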